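-- pv_equiv track=rewrite | github.com/GenAIFinance/Unified_FinTech_Intelligence | fintech_digest.py | _is_valid_feed_content
-- ===== SOURCE A (Python) =====
-- def _is_valid_feed_content(content: str) -> bool:
--     if not content or len(content) < 50:
--         return False
--     content_lower = content.lower()
--     feed_indicators = [
--         '<rss', '<feed', '<atom', '<?xml',
--         'application/rss+xml', 'application/atom+xml',
--         '<channel>', '<entry>', '<item>'
--     ]
--     return any(indicator in content_lower for indicator in feed_indicators)
-- ===== SOURCE B (Python) =====
-- # Single pass over the text: at each position, a first-character dispatch table
-- # selects the few indicators that could start there; startswith checks them.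
-- _BY_FIRST = {
--     '<': ('<rss', '<feed', '<atom', '<?xml', '<channel>', '<entry>', '<item>'),
--     'a': ('application/rss+xml', 'application/atom+xml'),
-- }
--
-- def _is_valid_feed_content(content: str) -> bool:
--     if not content or len(content) < 50:
--         return False
--     cl = content.lower()
--     for i, c in enumerate(cl):
--         for ind in _BY_FIRST.get(c, ()):
--             if cl.startswith(ind, i):
--                 return True
--     return False
-- ===== Notes on version B (the rewrite author's own statement) =====
-- stated objective: alternative
-- what changed: Replaces A's nine independent full-text substring membership scans by a single left-to-right scan over positions with a dict keyed on the first character dispatching to the few indicators that could match at that position.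
import Mathlib
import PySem

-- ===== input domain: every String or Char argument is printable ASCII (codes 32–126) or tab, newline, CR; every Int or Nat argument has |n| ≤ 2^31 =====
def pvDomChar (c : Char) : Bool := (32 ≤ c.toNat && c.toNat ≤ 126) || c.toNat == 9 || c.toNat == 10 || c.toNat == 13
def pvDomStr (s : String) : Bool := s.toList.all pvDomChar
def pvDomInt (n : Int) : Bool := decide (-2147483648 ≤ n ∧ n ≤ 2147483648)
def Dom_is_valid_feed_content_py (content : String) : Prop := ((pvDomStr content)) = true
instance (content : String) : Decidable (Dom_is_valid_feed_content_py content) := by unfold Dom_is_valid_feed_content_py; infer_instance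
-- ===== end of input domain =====

-- B replaces A's nine independent substring scans by one left-to-right scan with a
-- first-character dispatch table (objective: alternative, same exact behaviour).

-- ===== PORT A =====
-- string literals are ported as explicit char lists; 'sub in s' is PySem.Chars.isIn
def feedIndicators : List (List Char) :=
  [['<', 'r', 's', 's'],
   ['<', 'f', 'e', 'e', 'd'],
   ['<', 'a', 't', 'o', 'm'],
   ['<', '?', 'x', 'm', 'l'],
   ['a', 'p', 'p', 'l', 'i', 'c', 'a', 't', 'i', 'o', 'n', '/', 'r', 's', 's', '+', 'x', 'm', 'l'],
   ['a', 'p', 'p', 'l', 'i', 'c', 'a', 't', 'i', 'o', 'n', '/', 'a', 't', 'o', 'm', '+', 'x', 'm', 'l'],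
   ['<', 'c', 'h', 'a', 'n', 'n', 'e', 'l', '>'],
   ['<', 'e', 'n', 't', 'r', 'y', '>'],
   ['<', 'i', 't', 'e', 'm', '>']]

def is_valid_feed_content_py (content : String) : Bool :=
  if content.toList.isEmpty || decide (PySem.Chars.len content.toList < 50) then false
  else
    let content_lower := PySem.Chars.lower content.toList
    feedIndicators.any (fun ind => PySem.Chars.isIn ind content_lower)

-- ===== PORT B =====
def bLtInds : List (List Char) :=
  [['<', 'r', 's', 's'],
   ['<', 'f', 'e', 'e', 'd'],
   ['<', 'a', 't', 'o', 'm'],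
   ['<', '?', 'x', 'm', 'l'],
   ['<', 'c', 'h', 'a', 'n', 'n', 'e', 'l', '>'],
   ['<', 'e', 'n', 't', 'r', 'y', '>'],
   ['<', 'i', 't', 'e', 'm', '>']]

def bAInds : List (List Char) :=
  [['a', 'p', 'p', 'l', 'i', 'c', 'a', 't', 'i', 'o', 'n', '/', 'r', 's', 's', '+', 'x', 'm', 'l'],
   ['a', 'p', 'p', 'l', 'i', 'c', 'a', 't', 'i', 'o', 'n', '/', 'a', 't', 'o', 'm', '+', 'x', 'm', 'l']]

-- the two-key dict lookup _BY_FIRST.get(c, ()) is ported as its first-match conditional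
def bScan : List Char → Bool
  | [] => false
  | c :: rest =>
      ((if c = '<' then bLtInds else if c = 'a' then bAInds else []).any
          (fun ind => ind.isPrefixOf (c :: rest)))
        || bScan rest

def is_valid_feed_content_py_alt (content : String) : Bool :=
  if content.toList.isEmpty || decide (PySem.Chars.len content.toList < 50) then false
  else bScan (PySem.Chars.lower content.toList)

-- ===== PRECONDITION & SPEC =====
def Spec_is_valid_feed_content_py (content : String) (out : Bool) : Prop := out = is_valid_feed_content_py_alt content
instance (content : String) (out : Bool) : Decidable (Spec_is_valid_feed_content_py content out) := by unfold Spec_is_valid_feed_content_py; infer_instance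

-- ===== CLAIM (what is proved, stated in full; the proofs are below) =====
def Claim_equal_is_valid_feed_content_py : Prop := ∀ (content : String), Dom_is_valid_feed_content_py content → Spec_is_valid_feed_content_py content (is_valid_feed_content_py content)

-- ===== LEMMAS AND PROOFS =====

-- a candidate whose head differs from c can never be a prefix of c :: rest
theorem pv_prefix_head_ne (a c : Char) (as rest : List Char) (h : a ≠ c) :
    (a :: as).isPrefixOf (c :: rest) = false := by
  simp [List.isPrefixOf, h]

-- dispatching on the first character tests exactly the same indicators
theorem pv_dispatch (c : Char) (rest : List Char) :
    ((if c = '<' then bLtInds else if c = 'a' then bAInds else []).any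
        (fun ind => ind.isPrefixOf (c :: rest)))
      = feedIndicators.any (fun ind => ind.isPrefixOf (c :: rest)) := by
  by_cases h1 : c = '<'
  · subst h1
    simp [bLtInds, feedIndicators, pv_prefix_head_ne]
  · by_cases h2 : c = 'a'
    · subst h2
      simp [bAInds, feedIndicators, pv_prefix_head_ne]
    · simp [feedIndicators, h1, h2,
        pv_prefix_head_ne '<' c _ rest (fun h => h1 h.symm),
        pv_prefix_head_ne 'a' c _ rest (fun h => h2 h.symm)]

-- the scan finds an indicator iff some indicator occurs as an infix
theorem pv_scan_iff (L : List Char) :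
    bScan L = true ↔ ∃ ind ∈ feedIndicators, ind <:+: L := by
  induction L with
  | nil =>
    show false = true ↔ _
    decide
  | cons c rest ih =>
    rw [bScan, Bool.or_eq_true, pv_dispatch, List.any_eq_true, ih]
    constructor
    · rintro (⟨ind, hmem, hp⟩ | ⟨ind, hmem, hinf⟩)
      · exact ⟨ind, hmem, (List.isPrefixOf_iff_prefix.mp hp).isInfix⟩
      · exact ⟨ind, hmem, List.infix_cons_iff.mpr (Or.inr hinf)⟩
    · rintro ⟨ind, hmem, hinf⟩
      rcases List.infix_cons_iff.mp hinf with hp | hinf'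
      · exact Or.inl ⟨ind, hmem, List.isPrefixOf_iff_prefix.mpr hp⟩
      · exact Or.inr ⟨ind, hmem, hinf'⟩

theorem pv_scan_eq (L : List Char) :
    feedIndicators.any (fun ind => PySem.Chars.isIn ind L) = bScan L := by
  rcases h : bScan L with _ | _
  · rw [List.any_eq_false]
    intro ind hmem hin
    have hinf := (PySem.Chars.isIn_iff_infix _ _).mp hin
    exact absurd (pv_scan_iff L |>.mpr ⟨ind, hmem, hinf⟩) (by simp [h])
  · rcases (pv_scan_iff L).mp h with ⟨ind, hmem, hinf⟩
    rw [List.any_eq_true]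
    exact ⟨ind, hmem, (PySem.Chars.isIn_iff_infix _ _).mpr hinf⟩

-- ===== VERDICT (by name: the statement is the Claim_ definition above) =====
theorem is_valid_feed_content_py_spec : Claim_equal_is_valid_feed_content_py := by
  intro content _
  unfold Spec_is_valid_feed_content_py is_valid_feed_content_py is_valid_feed_content_py_alt
  split
  · rfl
  · exact pv_scan_eq (PySem.Chars.lower content.toList)
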